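-- pv_equiv track=rewrite | github.com/aurelien-barbotin/proced-deepseg | proced_deepseg/measure_division_fromtrackmate.py | merge_times_dict
-- ===== SOURCE A (Python) =====
-- def merge_times_dict(td):
--     outx = []
--     outy = []
--     for k in td.keys():
--         pairs = td[k]
--         for pair in pairs:
--             outx.append(pair[0])
--             outy.append(pair[1])
--     return outx, outy
-- ===== SOURCE B (Python) =====
-- def merge_times_dict(td):
--     # Two independent passes over the dict, each extracting one column,
--     # instead of one pass maintaining two parallel accumulators.
--     def column(j):
--         out = []
--         for pairs in td.values():
--             out.extend(pair[j] for pair in pairs)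
--         return out
--     return column(0), column(1)
-- ===== Notes on version B (the rewrite author's own statement) =====
-- stated objective: alternative
-- what changed: Replaces A's single pass that maintains two parallel accumulators with two independent passes over the dict values, each pass extracting one column of the pairs on its own.
import Mathlib
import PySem

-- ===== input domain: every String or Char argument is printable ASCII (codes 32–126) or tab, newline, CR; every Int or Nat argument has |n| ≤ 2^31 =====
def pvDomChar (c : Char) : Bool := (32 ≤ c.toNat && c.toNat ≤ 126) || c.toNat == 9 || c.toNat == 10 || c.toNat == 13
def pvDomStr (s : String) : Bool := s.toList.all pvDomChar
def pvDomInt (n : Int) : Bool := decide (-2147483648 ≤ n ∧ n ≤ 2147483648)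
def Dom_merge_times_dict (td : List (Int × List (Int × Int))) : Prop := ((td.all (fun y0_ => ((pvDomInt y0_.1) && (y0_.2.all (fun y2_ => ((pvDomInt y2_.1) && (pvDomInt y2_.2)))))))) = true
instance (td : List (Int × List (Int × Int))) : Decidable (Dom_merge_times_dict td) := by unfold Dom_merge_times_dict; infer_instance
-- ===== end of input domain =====

-- ===== PORT A =====
-- B traverses the dict twice, once per output column, instead of A's single pass with two parallel accumulators; same cost.
def merge_times_dict (td : List (Int × List (Int × Int))) : List Int × List Int :=
  -- outx = []; outy = []; for k in td.keys(): pairs = td[k]; for pair in pairs: append…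
  let st := td.foldl (fun (st : List Int × List Int) kv =>
    kv.2.foldl (fun (st : List Int × List Int) pair =>
      (st.1 ++ [pair.1], st.2 ++ [pair.2])) st) ([], [])
  (st.1, st.2)

-- ===== PORT B =====
-- column(j): out = []; for pairs in td.values(): out.extend(pair[j] for pair in pairs)
def mtdColumn (td : List (Int × List (Int × Int))) (f : Int × Int → Int) : List Int :=
  td.foldl (fun out kv => out ++ kv.2.map f) []

def merge_times_dict_alt (td : List (Int × List (Int × Int))) : List Int × List Int :=
  (mtdColumn td (fun p => p.1), mtdColumn td (fun p => p.2))

-- ===== PRECONDITION & SPEC =====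
def Spec_merge_times_dict (td : List (Int × List (Int × Int))) (out : List Int × List Int) : Prop := out = merge_times_dict_alt td
instance (td : List (Int × List (Int × Int))) (out : List Int × List Int) : Decidable (Spec_merge_times_dict td out) := by unfold Spec_merge_times_dict; infer_instance

-- ===== CLAIM (what is proved, stated in full; the proofs are below) =====
def Claim_equal_merge_times_dict : Prop := ∀ (td : List (Int × List (Int × Int))), Dom_merge_times_dict td → Spec_merge_times_dict td (merge_times_dict td)

-- ===== LEMMAS AND PROOFS =====

-- ===== VERDICT (by name: the statement is the Claim_ definition above) =====
lemma mtd_inner (ps : List (Int × Int)) (st : List Int × List Int) :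
    ps.foldl (fun (st : List Int × List Int) pair =>
      (st.1 ++ [pair.1], st.2 ++ [pair.2])) st
      = (st.1 ++ ps.map (fun p => p.1), st.2 ++ ps.map (fun p => p.2)) := by
  induction ps generalizing st with
  | nil => simp
  | cons p ps ih => simp [ih]

lemma mtd_outer (td : List (Int × List (Int × Int))) (st : List Int × List Int) :
    td.foldl (fun (st : List Int × List Int) kv =>
      kv.2.foldl (fun (st : List Int × List Int) pair =>
        (st.1 ++ [pair.1], st.2 ++ [pair.2])) st) st
      = (st.1 ++ (td.flatMap (fun kv => kv.2)).map (fun p => p.1),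
         st.2 ++ (td.flatMap (fun kv => kv.2)).map (fun p => p.2)) := by
  induction td generalizing st with
  | nil => simp
  | cons kv td ih => rw [List.foldl_cons, mtd_inner, ih]; simp

lemma mtdColumn_aux (td : List (Int × List (Int × Int))) (f : Int × Int → Int)
    (acc : List Int) :
    td.foldl (fun out kv => out ++ kv.2.map f) acc
      = acc ++ (td.flatMap (fun kv => kv.2)).map f := by
  induction td generalizing acc with
  | nil => simp
  | cons kv td ih => simp [ih]

lemma mtdColumn_eq (td : List (Int × List (Int × Int))) (f : Int × Int → Int) :
    mtdColumn td f = (td.flatMap (fun kv => kv.2)).map f := by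
  unfold mtdColumn; rw [mtdColumn_aux]; simp

theorem merge_times_dict_spec : Claim_equal_merge_times_dict := by
  intro td _
  unfold Spec_merge_times_dict merge_times_dict merge_times_dict_alt
  rw [mtd_outer, mtdColumn_eq, mtdColumn_eq]
  simp
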